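-- pv_equiv track=rewrite | github.com/sohhyung/CHI_2026 | utils/models/custom_utils/response_generator.py | assign_roles_from_last_user
-- ===== SOURCE A (Python) =====
-- from typing import Dict, Any, List, Tuple, Optional
-- from typing import Dict, Any, List, Optional
-- from typing import List, Tuple
--
-- def assign_roles_from_last_user(msgs: List[str], last_is_user: bool = True) -> List[Tuple[str, str]]:
--     """
--     입력: 텍스트 리스트 (마지막 원소가 user라고 가정; 필요하면 last_is_user=False로)
--     출력: [("user"|"assistant", "text"), ...]  // 시간순 유지
--     """
--     n = len(msgs)
--     roles = [""] * n
--     for i in range(n - 1, -1, -1):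
--         if i == n - 1:
--             roles[i] = "user" if last_is_user else "assistant"
--         else:
--             roles[i] = "assistant" if roles[i + 1] == "user" else "user"
--     return [(roles[i], (msgs[i] or "").strip()) for i in range(n)]
-- ===== SOURCE B (Python) =====
-- def assign_roles_from_last_user(msgs, last_is_user=True):
--     n = len(msgs)
--     base = "user" if last_is_user else "assistant"
--     other = "assistant" if last_is_user else "user"
--     return [(base if (n - 1 - i) % 2 == 0 else other, (m or "").strip())
--             for i, m in enumerate(msgs)]
-- ===== Notes on version B (the rewrite author's own statement) =====
-- stated objective: simpler
-- what changed: Replaces the backward flip-propagating loop and the roles array with a single forward comprehension that computes each role in closed form from index parity relative to the last element.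
import Mathlib
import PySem

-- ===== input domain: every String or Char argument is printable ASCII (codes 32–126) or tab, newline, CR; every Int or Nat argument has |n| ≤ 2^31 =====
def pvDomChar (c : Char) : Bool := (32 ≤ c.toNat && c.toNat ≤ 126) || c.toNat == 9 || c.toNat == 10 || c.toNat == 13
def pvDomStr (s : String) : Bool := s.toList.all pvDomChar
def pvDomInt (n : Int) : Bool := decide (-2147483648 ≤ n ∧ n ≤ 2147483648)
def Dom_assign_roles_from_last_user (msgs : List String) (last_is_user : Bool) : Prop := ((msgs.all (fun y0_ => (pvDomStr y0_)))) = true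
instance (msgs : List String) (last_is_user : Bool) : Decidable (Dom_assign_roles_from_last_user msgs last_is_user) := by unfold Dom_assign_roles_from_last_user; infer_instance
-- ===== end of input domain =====

-- B replaces A's backward flip-propagating loop and roles array with a single forward
-- comprehension computing each role in closed form from index parity (objective: simpler).

-- ===== PORT A =====
-- A's backward loop `for i in range(n-1,-1,-1)` filling the roles array, as recursion on i.
def pvBuildRoles (n : Nat) (last_is_user : Bool) (roles : List String) (i : Int) : List String :=
  if h : 0 ≤ i then
    let r : String :=
      if i = (n : Int) - 1 then (if last_is_user then "user" else "assistant")
      else (if roles.getD (i + 1).toNat "" == "user" then "assistant" else "user")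
    pvBuildRoles n last_is_user (roles.set i.toNat r) (i - 1)
  else roles
termination_by (i + 1).toNat
decreasing_by omega

def assign_roles_from_last_user (msgs : List String) (last_is_user : Bool) : List (String × String) :=
  let n := msgs.length
  let roles := pvBuildRoles n last_is_user (List.replicate n "") ((n : Int) - 1)
  (List.range n).map (fun i =>
    let m := msgs.getD i ""
    (roles.getD i "", PySem.Str.strip (if m == "" then "" else m)))

-- ===== PORT B =====
def assign_roles_from_last_user_alt (msgs : List String) (last_is_user : Bool) : List (String × String) :=
  let n := msgs.length
  let base := if last_is_user then "user" else "assistant"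
  let other := if last_is_user then "assistant" else "user"
  (PySem.List.enumerate msgs).map (fun p =>
    ((if ((n : Int) - 1 - p.1) % 2 = 0 then base else other),
     PySem.Str.strip (if p.2 == "" then "" else p.2)))

-- ===== PRECONDITION & SPEC =====
def Spec_assign_roles_from_last_user (msgs : List String) (last_is_user : Bool) (out : List (String × String)) : Prop := out = assign_roles_from_last_user_alt msgs last_is_user
instance (msgs : List String) (last_is_user : Bool) (out : List (String × String)) : Decidable (Spec_assign_roles_from_last_user msgs last_is_user out) := by unfold Spec_assign_roles_from_last_user; infer_instance

-- ===== CLAIM (what is proved, stated in full; the proofs are below) =====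
def Claim_equal_assign_roles_from_last_user : Prop := ∀ (msgs : List String) (last_is_user : Bool), Dom_assign_roles_from_last_user msgs last_is_user → Spec_assign_roles_from_last_user msgs last_is_user (assign_roles_from_last_user msgs last_is_user)

-- ===== LEMMAS AND PROOFS =====

-- The closed-form role at index j (n = length), as a Nat-parity formula.
def pvTarget (n : Nat) (last_is_user : Bool) (j : Nat) : String :=
  if (n - 1 - j) % 2 = 0 then (if last_is_user then "user" else "assistant")
  else (if last_is_user then "assistant" else "user")

lemma pvTarget_flip (n : Nat) (b : Bool) (j : Nat) (hj : j + 1 < n) :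
    (if pvTarget n b (j + 1) == "user" then "assistant" else "user") = pvTarget n b j := by
  unfold pvTarget
  rcases Nat.even_or_odd (n - 1 - (j + 1)) with he | ho
  · have h1 : (n - 1 - (j + 1)) % 2 = 0 := Nat.even_iff.mp he
    have h3 : (n - 1 - j) % 2 = 1 := by omega
    cases b <;> simp [h1, h3]
  · have h1 : (n - 1 - (j + 1)) % 2 = 1 := Nat.odd_iff.mp ho
    have h3 : (n - 1 - j) % 2 = 0 := by omega
    cases b <;> simp [h1, h3]

lemma pvBuildRoles_getD (n : Nat) (b : Bool) (roles : List String) (i : Int)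
    (hlen : roles.length = n) (hi : i < (n : Int))
    (hup : ∀ j : Nat, j < n → i < (j : Int) → roles.getD j "" = pvTarget n b j) :
    ∀ j : Nat, j < n → (pvBuildRoles n b roles i).getD j "" = pvTarget n b j := by
  fun_induction pvBuildRoles n b roles i with
  | case1 roles i h r ih =>
    intro j hj
    refine ih (by simpa using hlen) (by omega) ?_ j hj
    intro k hk hik
    by_cases hke : (k : Int) = i
    · have hki : k = i.toNat := by omega
      have hklen : k < roles.length := by omega
      rw [hki, List.getD_eq_getElem?_getD, List.getElem?_set_self (by omega)]
      simp only [Option.getD_some]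
      show r = pvTarget n b i.toNat
      simp only [r]
      by_cases hlast : i = (n : Int) - 1
      · have hnn : i.toNat = n - 1 := by omega
        rw [hnn]
        simp only [dif_pos hlast]
        unfold pvTarget
        cases b <;> simp
      · simp only [dif_neg hlast]
        have h1 : (i + 1).toNat = i.toNat + 1 := by omega
        have h2 : i.toNat + 1 < n := by omega
        rw [h1, hup (i.toNat + 1) h2 (by omega)]
        exact pvTarget_flip n b i.toNat h2
    · have hset : (roles.set i.toNat r).getD k "" = roles.getD k "" := by
        rw [List.getD_eq_getElem?_getD, List.getD_eq_getElem?_getD,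
          List.getElem?_set_ne (by omega)]
      rw [hset]
      exact hup k hk (by omega)
  | case2 roles i h =>
    intro j hj
    exact hup j hj (by omega)

lemma pvRoles_getD (msgs : List String) (b : Bool) (j : Nat) (hj : j < msgs.length) :
    (pvBuildRoles msgs.length b (List.replicate msgs.length "") ((msgs.length : Int) - 1)).getD j ""
      = pvTarget msgs.length b j := by
  apply pvBuildRoles_getD
  · simp
  · omega
  · intro k hk hik; omega
  · exact hj

lemma pvTarget_int (n : Nat) (b : Bool) (j : Nat) (hj : j < n) :
    (if ((n : Int) - 1 - (j : Int)) % 2 = 0 then (if b then "user" else "assistant")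
     else (if b then "assistant" else "user")) = pvTarget n b j := by
  unfold pvTarget
  have h : (n : Int) - 1 - (j : Int) = ((n - 1 - j : Nat) : Int) := by omega
  rw [h]
  rcases Nat.even_or_odd (n - 1 - j) with he | ho
  · have h1 := Nat.even_iff.mp he
    have h2 : ((n - 1 - j : Nat) : Int) % 2 = 0 := by omega
    simp [h1, h2]
  · have h1 := Nat.odd_iff.mp ho
    have h2 : ¬ ((n - 1 - j : Nat) : Int) % 2 = 0 := by omega
    simp [h1, h2]

-- ===== VERDICT (by name: the statement is the Claim_ definition above) =====
theorem assign_roles_from_last_user_spec : Claim_equal_assign_roles_from_last_user := by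
  intro msgs b _
  unfold Spec_assign_roles_from_last_user assign_roles_from_last_user assign_roles_from_last_user_alt
  rw [PySem.List.enumerate_eq_map_pyRange (d := ""), PySem.List.pyRange_one, List.map_map]
  apply List.ext_getElem (by simp)
  intro i h1 h2
  simp only [List.getElem_map, List.getElem_range, Function.comp]
  have hi : i < msgs.length := by simpa using h1
  rw [pvRoles_getD msgs b i hi]
  simp only [zero_add, PySem.List.pyGetD_natCast]
  rw [pvTarget_int msgs.length b i hi]
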